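-- pv_equiv track=rewrite | github.com/ritianpig/spider | app15/ylxw/caizhuang.py | to_img
-- ===== SOURCE A (Python) =====
-- def to_img(article):
-- 	'''处理文章中的图片显示位置和图片个数，listx为处理过的文章'''
-- 	d = []
-- 	e = []
-- 	for i in article:
-- 		d.append(str(i))
-- 	for k in d:
-- 		if '<Element img' in k:
-- 			k = '[img]'
-- 		e.append(k)
--
-- 	id1 = [i for i,x in enumerate(e) if x=='[img]']
-- 	for x,y in zip(range(1,len(id1)+1),id1):
-- 		e[y] = '[img%s]'%(str(x))
-- 	article = e
-- 	img_num = len(id1)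
-- 	return article,img_num
-- ===== SOURCE B (Python) =====
-- def to_img(article):
--     out = []
--     img_num = 0
--     for i in article:
--         s = str(i)
--         if '<Element img' in s:
--             s = '[img]'
--         if s == '[img]':
--             img_num += 1
--             s = '[img%s]' % img_num
--         out.append(s)
--     return out, img_num
-- ===== Notes on version B (the rewrite author's own statement) =====
-- stated objective: simpler
-- what changed: Replaced A's four passes (stringify list, substring-replace list, index-collect via enumerate, renumber by in-place assignment over zip(range, indices)) with one loop that carries a running counter and emits each output string directly.
import Mathlib
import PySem

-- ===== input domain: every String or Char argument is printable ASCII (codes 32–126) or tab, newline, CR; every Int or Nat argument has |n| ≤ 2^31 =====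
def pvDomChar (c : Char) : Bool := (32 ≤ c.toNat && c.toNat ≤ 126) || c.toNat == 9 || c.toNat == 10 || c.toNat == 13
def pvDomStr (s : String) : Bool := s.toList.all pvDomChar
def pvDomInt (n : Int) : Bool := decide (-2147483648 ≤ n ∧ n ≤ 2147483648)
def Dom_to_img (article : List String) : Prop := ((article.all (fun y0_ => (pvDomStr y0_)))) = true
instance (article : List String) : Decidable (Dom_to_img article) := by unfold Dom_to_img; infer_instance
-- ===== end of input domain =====

-- B fuses A's four passes (stringify, replace, index-collect, renumber) into one counting loop; objective: simpler.


-- ===== PORT A =====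
def to_img (article : List String) : List String × Int :=
  -- d = []; for i in article: d.append(str(i))   (str(i) is the identity: the elements are strings)
  let d : List String := article.foldl (fun d i => d ++ [i]) []
  -- e = []; for k in d: if '<Element img' in k: k = '[img]'; e.append(k)
  let e : List String := d.foldl (fun e k =>
    let k := if PySem.Str.isIn "<Element img" k then "[img]" else k
    e ++ [k]) []
  -- id1 = [i for i,x in enumerate(e) if x=='[img]']
  let id1 : List Int := ((PySem.List.enumerate e 0).filter (fun p => p.2 == "[img]")).map (·.1)
  -- for x,y in zip(range(1,len(id1)+1),id1): e[y] = '[img%s]' % str(x)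
  let e := (List.zip (PySem.List.pyRange 1 ((id1.length : Int) + 1) 1) id1).foldl
    (fun e p => PySem.List.pySetD e p.2 ("[img" ++ PySem.Int.toStr p.1 ++ "]")) e
  (e, (id1.length : Int))

-- ===== PORT B =====
def to_img_alt (article : List String) : List String × Int :=
  article.foldl (fun (acc : List String × Int) i =>
    let s := if PySem.Str.isIn "<Element img" i then "[img]" else i
    if s == "[img]" then
      (acc.1 ++ ["[img" ++ PySem.Int.toStr (acc.2 + 1) ++ "]"], acc.2 + 1)
    else (acc.1 ++ [s], acc.2)) ([], 0)

-- ===== PRECONDITION & SPEC =====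
def Spec_to_img (article : List String) (out : List String × Int) : Prop := out = to_img_alt article
instance (article : List String) (out : List String × Int) : Decidable (Spec_to_img article out) := by unfold Spec_to_img; infer_instance

-- ===== CLAIM (what is proved, stated in full; the proofs are below) =====
def Claim_equal_to_img : Prop := ∀ (article : List String), Dom_to_img article → Spec_to_img article (to_img article)

-- ===== LEMMAS AND PROOFS =====

-- the substring-replace step applied to one element
def pvRepl (k : String) : String := if PySem.Str.isIn "<Element img" k then "[img]" else k

-- renumbering the '[img]' occurrences of a list, counter starting at c
def pvNum (l : List String) (c : Int) : List String :=
  match l with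
  | [] => []
  | s :: t => if s == "[img]" then ("[img" ++ PySem.Int.toStr c ++ "]") :: pvNum t (c + 1)
              else s :: pvNum t c

-- B's loop body, named for proof bookkeeping (definitionally the lambda in to_img_alt)
def pvStepB (acc : List String × Int) (i : String) : List String × Int :=
  let s := pvRepl i
  if s == "[img]" then
    (acc.1 ++ ["[img" ++ PySem.Int.toStr (acc.2 + 1) ++ "]"], acc.2 + 1)
  else (acc.1 ++ [s], acc.2)

theorem pvB_fold (l : List String) (acc : List String) (c : Int) :
    l.foldl pvStepB (acc, c)
    = (acc ++ pvNum (l.map pvRepl) (c + 1),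
       c + ((l.map pvRepl).count "[img]" : Int)) := by
  induction l generalizing acc c with
  | nil => simp [pvNum]
  | cons i t ih =>
    simp only [List.foldl_cons, List.map_cons]
    by_cases h : pvRepl i = "[img]"
    · have hb : pvStepB (acc, c) i
          = (acc ++ ["[img" ++ PySem.Int.toStr (c + 1) ++ "]"], c + 1) := by
        simp only [pvStepB]
        rw [if_pos (by simp [h])]
      rw [hb, ih]
      simp [pvNum, h]
      ring
    · have hb : pvStepB (acc, c) i = (acc ++ [pvRepl i], c) := by
        simp only [pvStepB]
        rw [if_neg (by simp [h])]
      rw [hb, ih]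
      simp [pvNum, h]

-- shifting the start of enumerate shifts every index by one
theorem pvEnum_shift {α : Type} (l : List α) (s : Int) :
    PySem.List.enumerate l (s + 1) =
      (PySem.List.enumerate l s).map (fun p => (p.1 + 1, p.2)) := by
  induction l generalizing s with
  | nil => simp [PySem.List.enumerate_nil]
  | cons x t ih => simp [PySem.List.enumerate_cons, ih]

-- every index produced by enumerate from 0 is nonnegative
theorem pvEnum_nonneg {α : Type} (l : List α) (p : Int × α)
    (h : p ∈ PySem.List.enumerate l 0) : 0 ≤ p.1 := by
  rcases (PySem.List.mem_enumerate_iff _ _ _).1 h with ⟨k, hk, rfl⟩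
  simp

-- setting only at indices ≥ 1 leaves the head alone and acts shifted on the tail
theorem pvSet_shift (pairs : List (Int × Int)) (v : String) (t : List String)
    (h : ∀ p ∈ pairs, 0 ≤ p.2) :
    (pairs.map (fun p => (p.1, p.2 + 1))).foldl
        (fun e p => PySem.List.pySetD e p.2 ("[img" ++ PySem.Int.toStr p.1 ++ "]")) (v :: t)
    = v :: pairs.foldl
        (fun e p => PySem.List.pySetD e p.2 ("[img" ++ PySem.Int.toStr p.1 ++ "]")) t := by
  induction pairs generalizing t with
  | nil => simp
  | cons q qs ih =>
    have hq : 0 ≤ q.2 := h q (by simp)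
    simp only [List.map_cons, List.foldl_cons]
    have e1 : PySem.List.pySetD (v :: t) (q.2 + 1) ("[img" ++ PySem.Int.toStr q.1 ++ "]")
        = v :: PySem.List.pySetD t q.2 ("[img" ++ PySem.Int.toStr q.1 ++ "]") := by
      rw [PySem.List.pySetD_of_nonneg _ _ (show (0:Int) ≤ q.2 + 1 by omega),
          PySem.List.pySetD_of_nonneg _ _ hq]
      have h2 : (q.2 + 1).toNat = q.2.toNat + 1 := by omega
      rw [h2]
      rfl
    rw [e1]
    exact ih _ (fun p hp => h p (by simp [hp]))

-- A's renumbering fold over zip(range(c, len+c), id1) computes pvNum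
theorem pvA_renum (e : List String) (c : Int) :
    (List.zip (PySem.List.pyRange c (((((PySem.List.enumerate e 0).filter (fun p => p.2 == "[img]")).map (·.1)).length : Int) + c) 1)
              (((PySem.List.enumerate e 0).filter (fun p => p.2 == "[img]")).map (·.1))).foldl
      (fun e p => PySem.List.pySetD e p.2 ("[img" ++ PySem.Int.toStr p.1 ++ "]")) e
    = pvNum e c := by
  induction e generalizing c with
  | nil => simp [PySem.List.enumerate_nil, pvNum]
  | cons s t ih =>
    have hshift : PySem.List.enumerate t 1 =
        (PySem.List.enumerate t 0).map (fun p => (p.1 + 1, p.2)) := by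
      simpa using pvEnum_shift t 0
    -- the index list of the tail, and its +1-shifted version occurring in e = s :: t
    have hids : ((PySem.List.enumerate t 1).filter (fun p => p.2 == "[img]")).map (·.1)
        = ((((PySem.List.enumerate t 0).filter (fun p => p.2 == "[img]")).map (·.1)).map (· + 1)) := by
      rw [hshift, List.filter_map, List.map_map, List.map_map]
      rfl
    have hnn : ∀ (rng : List Int) (p : Int × Int),
        p ∈ List.zip rng (((PySem.List.enumerate t 0).filter (fun p => p.2 == "[img]")).map (·.1)) → 0 ≤ p.2 := by
      intro rng p hp
      rcases List.of_mem_zip hp with ⟨_, h2⟩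
      obtain ⟨q, hq, hq2⟩ := List.mem_map.1 h2
      rw [← hq2]
      exact pvEnum_nonneg t q (List.mem_filter.1 hq).1
    have hzipmap : ∀ (rng ids : List Int),
        List.zip rng (ids.map (· + 1)) = (List.zip rng ids).map (fun p => (p.1, p.2 + 1)) := by
      intro rng ids
      rw [List.zip_map_right]
      rfl
    by_cases hs : s = "[img]"
    · simp only [PySem.List.enumerate_cons, List.filter_cons, hs]
      rw [if_pos (by simp)]
      simp only [List.map_cons, zero_add, hids, List.length_cons, List.length_map] at ih hnn ⊢
      have hE : ((((List.filter (fun p => p.2 == "[img]") (PySem.List.enumerate t 0)).length + 1 : Nat)) : Int) + c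
          = ((List.filter (fun p => p.2 == "[img]") (PySem.List.enumerate t 0)).length : Int) + (c + 1) := by
        push_cast
        ring
      rw [hE, PySem.List.pyRange_one_cons (by omega)]
      simp only [List.zip_cons_cons, List.foldl_cons]
      have hset : PySem.List.pySetD ("[img]" :: t) 0 ("[img" ++ PySem.Int.toStr c ++ "]")
          = ("[img" ++ PySem.Int.toStr c ++ "]") :: t := by
        rw [PySem.List.pySetD_of_nonneg _ _ (show (0:Int) ≤ 0 by omega)]
        rfl
      rw [hset, hzipmap, pvSet_shift _ _ _ (fun p hp => hnn _ p hp), ih (c + 1)]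
      simp [pvNum]
    · simp only [PySem.List.enumerate_cons, List.filter_cons]
      rw [if_neg (by simp [hs])]
      simp only [zero_add, hids, List.length_map] at ih hnn ⊢
      rw [hzipmap, pvSet_shift _ _ _ (fun p hp => hnn _ p hp), ih c]
      simp [pvNum, hs]

-- the number of collected indices is the number of '[img]' entries
theorem pvLen_id1 (e : List String) :
    (((PySem.List.enumerate e 0).filter (fun p => p.2 == "[img]")).map (·.1)).length
      = e.count "[img]" := by
  induction e with
  | nil => simp [PySem.List.enumerate_nil]
  | cons s t ih =>
    have hshift : PySem.List.enumerate t 1 =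
        (PySem.List.enumerate t 0).map (fun p => (p.1 + 1, p.2)) := by
      simpa using pvEnum_shift t 0
    have key : (List.filter (fun p => p.2 == "[img]") (PySem.List.enumerate t 1)).length
        = List.count "[img]" t := by
      rw [hshift, List.filter_map, List.length_map]
      have hcmp : ((fun p : Int × String => p.2 == "[img]") ∘ (fun p : Int × String => (p.1 + 1, p.2)))
          = (fun p : Int × String => p.2 == "[img]") := rfl
      rw [hcmp]
      simpa [List.length_map] using ih
    simp only [PySem.List.enumerate_cons, List.filter_cons, zero_add]
    by_cases hs : s = "[img]"
    · rw [if_pos (by simp [hs])]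
      simp [hs, key]
    · rw [if_neg (by simp [hs])]
      simp [hs, key]

-- ===== VERDICT (by name: the statement is the Claim_ definition above) =====
theorem to_img_spec : Claim_equal_to_img := by
  intro article _
  unfold Spec_to_img
  have halt : to_img_alt article = article.foldl pvStepB ([], 0) := rfl
  rw [halt, pvB_fold]
  unfold to_img
  simp only [PySem.List.foldl_append_singleton]
  have he : article.foldl (fun e k =>
      let k := if PySem.Str.isIn "<Element img" k then "[img]" else k
      e ++ [k]) [] = article.map pvRepl := by
    have h := PySem.List.foldl_append_singleton_eq_map pvRepl article []
    simpa [pvRepl] using h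
  simp only [List.nil_append] at he ⊢
  rw [he, pvA_renum (article.map pvRepl) 1, pvLen_id1]
  norm_num
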